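-- pv_equiv track=rewrite | github.com/gasiabi/Matrix-column-cipher | Shuffle_script.py | inserting_values
-- ===== SOURCE A (Python) =====
-- def generating_matrix(rows, columns):
--     matrix = []
--
--     for _ in range(rows):
--         row = []
--         for _ in range(columns):
--             row.append(" ")
--         matrix.append(row)
--     return matrix
--
-- def inserting_values(text, rows, columns):
--     matrix = generating_matrix(rows, columns)
--
--     text_index = 0
--
--     for x in range(rows):
--         for y in range(columns):
--             while text_index < len(text) and text[text_index] in ["\n", ",", "!", "?", "'"]:
--                 text_index += 1
--
--             if text_index < len(text):
--                 matrix[x][y] = text[text_index]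
--                 text_index += 1
--
--     return matrix
-- ===== SOURCE B (Python) =====
-- def inserting_values(text, rows, columns):
--     cleaned = [c for c in text if c not in {"\n", ",", "!", "?", "'"}]
--     n = len(cleaned)
--     return [[cleaned[x * columns + y] if x * columns + y < n else " "
--              for y in range(columns)]
--             for x in range(rows)]
-- ===== Notes on version B (the rewrite author's own statement) =====
-- stated objective: simpler
-- what changed: Replaces the interleaved fill loop with an inner skip-while over a running text index by two separate passes: first filter out the punctuation characters, then build the matrix directly by two nested comprehensions indexing the filtered list.
import Mathlib
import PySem

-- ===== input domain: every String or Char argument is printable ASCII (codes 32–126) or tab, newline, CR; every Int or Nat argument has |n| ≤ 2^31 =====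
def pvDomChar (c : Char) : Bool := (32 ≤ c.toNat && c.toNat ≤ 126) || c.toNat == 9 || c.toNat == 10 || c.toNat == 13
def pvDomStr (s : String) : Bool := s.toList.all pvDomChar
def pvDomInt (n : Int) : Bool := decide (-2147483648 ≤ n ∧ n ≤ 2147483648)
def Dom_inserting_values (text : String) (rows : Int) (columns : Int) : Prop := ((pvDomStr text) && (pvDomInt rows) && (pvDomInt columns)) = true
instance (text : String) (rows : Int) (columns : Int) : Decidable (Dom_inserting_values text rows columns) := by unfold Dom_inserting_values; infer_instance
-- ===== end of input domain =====

-- B replaces A's interleaved fill loop (inner skip-while over a running text index) by two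
-- separate passes: filter out the punctuation once, then index the filtered list directly. (simpler)

-- ===== PORT A =====
-- `text[i] in ["\n", ",", "!", "?", "'"]`: each list element is a 1-char string, so this is char equality
def pvBadA (c : Char) : Bool := c = '\n' || c = ',' || c = '!' || c = '?' || c = '\''

-- the inner `while text_index < len(text) and text[text_index] in [...]` loop, as recursion on the index
def pvSkip (cs : List Char) (ti : Nat) : Nat :=
  if h : ti < cs.length then
    if pvBadA cs[ti] then pvSkip cs (ti + 1) else ti
  else ti
termination_by cs.length - ti

def generating_matrix (rows : Int) (columns : Int) : List (List String) :=
  (PySem.List.pyRange 0 rows 1).foldl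
    (fun matrix _ =>
      matrix ++ [(PySem.List.pyRange 0 columns 1).foldl (fun row _ => row ++ [" "]) []])
    []

-- body of the inner `for y` loop: state = (matrix, text_index); `matrix[x][y] = text[text_index]`
def pvCellA (cs : List Char) (x : Int) (st : List (List String) × Nat) (y : Int) :
    List (List String) × Nat :=
  let ti := pvSkip cs st.2
  if h : ti < cs.length then
    (st.1.set x.toNat ((st.1.getD x.toNat []).set y.toNat (String.ofList [cs[ti]])), ti + 1)
  else (st.1, ti)

def inserting_values (text : String) (rows : Int) (columns : Int) : List (List String) :=
  let cs := text.toList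
  ((PySem.List.pyRange 0 rows 1).foldl
      (fun st x => (PySem.List.pyRange 0 columns 1).foldl (pvCellA cs x) st)
      (generating_matrix rows columns, 0)).1

-- ===== PORT B =====
def inserting_values_alt (text : String) (rows : Int) (columns : Int) : List (List String) :=
  let cleaned := text.toList.filter
    (fun c => !(c = '\n' || c = ',' || c = '!' || c = '?' || c = '\''))
  let n : Int := cleaned.length
  (PySem.List.pyRange 0 rows 1).map (fun x =>
    (PySem.List.pyRange 0 columns 1).map (fun y =>
      if x * columns + y < n then String.ofList [PySem.List.pyGetD cleaned (x * columns + y) ' ']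
      else " "))

-- ===== PRECONDITION & SPEC =====
def Spec_inserting_values (text : String) (rows : Int) (columns : Int) (out : List (List String)) : Prop := out = inserting_values_alt text rows columns
instance (text : String) (rows : Int) (columns : Int) (out : List (List String)) : Decidable (Spec_inserting_values text rows columns out) := by unfold Spec_inserting_values; infer_instance

-- ===== CLAIM (what is proved, stated in full; the proofs are below) =====
def Claim_equal_inserting_values : Prop := ∀ (text : String) (rows : Int) (columns : Int), Dom_inserting_values text rows columns → Spec_inserting_values text rows columns (inserting_values text rows columns)

-- ===== LEMMAS AND PROOFS =====

-- the characters A keeps (complement of pvBadA); B's filter predicate is definitionally this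
def pvKeep (c : Char) : Bool := !pvBadA c

-- the string the filled matrix shows at flat position i of the filtered character stream
def pvStrAt (σ : List Char) (i : Nat) : String :=
  match σ[i]? with
  | some c => String.ofList [c]
  | none => " "

lemma pyRange_zero_int (n : Int) :
    PySem.List.pyRange 0 n 1 = (List.range n.toNat).map (fun k : Nat => (k : Int)) := by
  rcases (show n ≤ 0 ∨ 0 < n by omega) with h | h
  · have h0 : n.toNat = 0 := by omega
    rw [h0]
    simp [PySem.List.pyRange]
    omega
  · have := PySem.List.pyRange_zero_natCast n.toNat
    rwa [Int.toNat_of_nonneg h.le] at this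

-- skipping punctuation does not change the filtered remainder of the text
lemma pvSkip_filter (cs : List Char) (ti : Nat) :
    (cs.drop (pvSkip cs ti)).filter pvKeep = (cs.drop ti).filter pvKeep := by
  fun_induction pvSkip cs ti with
  | case1 ti h hb ih =>
      rw [ih, List.drop_eq_getElem_cons h, List.filter_cons]
      simp [pvKeep, hb]
  | case2 ti h hb => rfl
  | case3 ti h => rfl

-- the filtered remainder seen from ti: its head is the char the skip loop stops on
lemma pvSkip_spec (cs : List Char) (ti : Nat) :
    (cs.drop ti).filter pvKeep =
      if h : pvSkip cs ti < cs.length then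
        cs[pvSkip cs ti] :: (cs.drop (pvSkip cs ti + 1)).filter pvKeep
      else [] := by
  fun_induction pvSkip cs ti with
  | case1 ti h hb ih =>
      rw [List.drop_eq_getElem_cons h, List.filter_cons]
      simpa [pvKeep, hb] using ih
  | case2 ti h hb =>
      rw [dif_pos h, List.drop_eq_getElem_cons h, List.filter_cons]
      simp [pvKeep, hb]
  | case3 ti h =>
      rw [dif_neg h, List.drop_eq_nil_of_le (by omega), List.filter_nil]

-- the inner loop acting on row x alone: state = (row, text_index)
def pvCellRow (cs : List Char) (st : List String × Nat) (y : Nat) : List String × Nat :=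
  let ti := pvSkip cs st.2
  if h : ti < cs.length then (st.1.set y (String.ofList [cs[ti]]), ti + 1) else (st.1, ti)

-- the inner loop factors through row x of the matrix
lemma pvCellA_factor (cs : List Char) (x : Nat) :
    ∀ (ys : List Nat) (mat : List (List String)) (ti : Nat) (hx : x < mat.length),
      (ys.map (fun k : Nat => (k : Int))).foldl (pvCellA cs (x : Int)) (mat, ti) =
        (mat.set x ((ys.foldl (pvCellRow cs) (mat[x]'hx, ti)).1),
         (ys.foldl (pvCellRow cs) (mat[x]'hx, ti)).2) := by
  intro ys
  induction ys with
  | nil =>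
      intro mat ti hx
      simp [List.set_getElem_self]
  | cons y ys ih =>
      intro mat ti hx
      simp only [List.map_cons, List.foldl_cons]
      by_cases h : pvSkip cs ti < cs.length
      · have e1 : pvCellA cs (x : Int) (mat, ti) (y : Int) =
            (mat.set x ((mat[x]'hx).set y (String.ofList [cs[pvSkip cs ti]'h])), pvSkip cs ti + 1) := by
          simp [pvCellA, h, List.getElem?_eq_getElem hx]
        have e2 : pvCellRow cs (mat[x]'hx, ti) y =
            ((mat[x]'hx).set y (String.ofList [cs[pvSkip cs ti]'h]), pvSkip cs ti + 1) := by
          simp [pvCellRow, h]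
        rw [e1, e2]
        have hx' : x < (mat.set x ((mat[x]'hx).set y (String.ofList [cs[pvSkip cs ti]'h]))).length := by
          simpa using hx
        rw [ih _ _ hx']
        simp [List.set_set, List.getElem_set_self]
      · have e1 : pvCellA cs (x : Int) (mat, ti) (y : Int) = (mat, pvSkip cs ti) := by
          simp [pvCellA, h]
        have e2 : pvCellRow cs (mat[x]'hx, ti) y = (mat[x]'hx, pvSkip cs ti) := by
          simp [pvCellRow, h]
        rw [e1, e2, ih _ _ hx]

-- row invariant: after filling the first m cells of a fresh row starting at text index ti₀
lemma pvRow_fold (cs : List Char) (C : Nat) (ti₀ : Nat) :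
    ∀ m, m ≤ C →
      (List.range m).foldl (pvCellRow cs) ((List.range C).map (fun _ => " "), ti₀) =
        ((List.range C).map
            (fun y => if y < m then pvStrAt ((cs.drop ti₀).filter pvKeep) y else " "),
         ((List.range m).foldl (pvCellRow cs) ((List.range C).map (fun _ => " "), ti₀)).2) ∧
      (cs.drop (((List.range m).foldl (pvCellRow cs) ((List.range C).map (fun _ => " "), ti₀)).2)).filter pvKeep
        = ((cs.drop ti₀).filter pvKeep).drop m := by
  intro m
  induction m with
  | zero => simp
  | succ m ih =>
      intro hm
      obtain ⟨h1, h2⟩ := ih (by omega)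
      set σ := (cs.drop ti₀).filter pvKeep with hσ
      rw [List.range_succ, List.foldl_append, List.foldl_cons, List.foldl_nil, h1]
      set t := ((List.range m).foldl (pvCellRow cs) ((List.range C).map (fun _ => " "), ti₀)).2 with ht
      have hspec := pvSkip_spec cs t
      have hfilt := pvSkip_filter cs t
      rw [h2] at hspec hfilt
      by_cases h : pvSkip cs t < cs.length
      · rw [dif_pos h] at hspec
        have estep : pvCellRow cs
              ((List.range C).map (fun y => if y < m then pvStrAt σ y else " "), t) m =
            (((List.range C).map (fun y => if y < m then pvStrAt σ y else " ")).set m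
               (String.ofList [cs[pvSkip cs t]'h]), pvSkip cs t + 1) := by
          simp [pvCellRow, h]
        rw [estep]
        have hmlt : m < σ.length := by
          by_contra hc
          rw [List.drop_eq_nil_of_le (by omega)] at hspec
          simp at hspec
        have hσm : σ[m]? = some (cs[pvSkip cs t]'h) := by
          have : (σ.drop m)[0]? = σ[m]? := by rw [List.getElem?_drop]; norm_num
          rw [hspec] at this
          simpa using this.symm
        refine ⟨Prod.ext_iff.mpr ⟨?_, rfl⟩, ?_⟩
        · dsimp only
          refine List.ext_getElem (by simp) ?_
          intro j hj1 hj2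
          simp only [List.length_map, List.length_range] at hj2
          simp only [List.getElem_set, List.getElem_map, List.getElem_range]
          by_cases hjm : m = j
          · subst hjm
            simp [pvStrAt, hσm]
          · rw [if_neg hjm]
            exact if_congr (by omega) rfl rfl
        · dsimp only
          have h3 : (cs.drop (pvSkip cs t + 1)).filter pvKeep = (σ.drop m).tail := by
            rw [hspec, List.tail_cons]
          rw [h3, List.tail_drop]
      · rw [dif_neg h] at hspec
        have estep : pvCellRow cs
              ((List.range C).map (fun y => if y < m then pvStrAt σ y else " "), t) m =
            ((List.range C).map (fun y => if y < m then pvStrAt σ y else " "), pvSkip cs t) := by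
          simp [pvCellRow, h]
        rw [estep]
        have hlen : σ.length ≤ m := by
          by_contra hc
          rw [List.drop_eq_nil_iff] at hspec
          omega
        refine ⟨Prod.ext_iff.mpr ⟨?_, rfl⟩, ?_⟩
        · apply List.map_congr_left
          intro y _
          by_cases hym : y = m
          · subst hym
            have hnone : σ[y]? = none := by
              rw [List.getElem?_eq_none_iff]
              omega
            simp [pvStrAt, hnone]
          · exact if_congr (by omega : y < m ↔ y < m + 1) rfl rfl
        · dsimp only
          rw [hfilt, hspec]
          exact (List.drop_eq_nil_of_le (by omega)).symm

lemma pvStrAt_drop (σ : List Char) (a y : Nat) : pvStrAt (σ.drop a) y = pvStrAt σ (a + y) := by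
  unfold pvStrAt
  rw [List.getElem?_drop]

-- outer invariant: after X rows, the matrix shows the filtered stream row-major
lemma pvOuter_fold (cs : List Char) (C R : Nat) :
    ∀ X, X ≤ R →
      (List.range X).foldl
          (fun st (x : Nat) =>
            ((List.range C).map (fun k : Nat => (k : Int))).foldl (pvCellA cs (x : Int)) st)
          ((List.range R).map (fun _ => (List.range C).map (fun _ => " ")), 0) =
        ((List.range R).map (fun i =>
            if i < X then (List.range C).map (fun y => pvStrAt (cs.filter pvKeep) (i * C + y))
            else (List.range C).map (fun _ => " ")),
         ((List.range X).foldl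
            (fun st (x : Nat) =>
              ((List.range C).map (fun k : Nat => (k : Int))).foldl (pvCellA cs (x : Int)) st)
            ((List.range R).map (fun _ => (List.range C).map (fun _ => " ")), 0)).2) ∧
      (cs.drop (((List.range X).foldl
            (fun st (x : Nat) =>
              ((List.range C).map (fun k : Nat => (k : Int))).foldl (pvCellA cs (x : Int)) st)
            ((List.range R).map (fun _ => (List.range C).map (fun _ => " ")), 0)).2)).filter pvKeep
        = (cs.filter pvKeep).drop (X * C) := by
  intro X
  induction X with
  | zero => simp
  | succ X ih =>
      intro hX
      obtain ⟨h1, h2⟩ := ih (by omega)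
      rw [List.range_succ, List.foldl_append, List.foldl_cons, List.foldl_nil, h1]
      set σ := cs.filter pvKeep with hσ
      set t := ((List.range X).foldl
          (fun st (x : Nat) =>
            ((List.range C).map (fun k : Nat => (k : Int))).foldl (pvCellA cs (x : Int)) st)
          ((List.range R).map (fun _ => (List.range C).map (fun _ => " ")), 0)).2 with ht
      set matX := (List.range R).map (fun i =>
          if i < X then (List.range C).map (fun y => pvStrAt σ (i * C + y))
          else (List.range C).map (fun _ => " ")) with hmat
      have hXR : X < R := by omega
      have hx : X < matX.length := by simpa [hmat] using hXR
      have hmx : matX[X]'hx = (List.range C).map (fun _ => " ") := by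
        simp [hmat]
      have hfac := pvCellA_factor cs X (List.range C) matX t hx
      rw [hfac, hmx]
      obtain ⟨r1, r2⟩ := pvRow_fold cs C t C (le_refl C)
      have hdrop0 : (cs.drop t).filter pvKeep = σ.drop (X * C) := h2
      rw [hdrop0] at r1 r2
      rw [r1]
      refine ⟨Prod.ext_iff.mpr ⟨?_, rfl⟩, ?_⟩
      · dsimp only
        refine List.ext_getElem (by simp [hmat]) ?_
        intro j hj1 hj2
        simp only [List.length_map, List.length_range] at hj2
        simp only [List.getElem_set, List.getElem_map, List.getElem_range, hmat]
        by_cases hjX : X = j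
        · subst hjX
          rw [if_pos rfl, if_pos (Nat.lt_succ_self X)]
          apply List.map_congr_left
          intro y hy
          rw [if_pos (List.mem_range.mp hy), pvStrAt_drop]
        · rw [if_neg hjX]
          by_cases hlt : j < X
          · rw [if_pos hlt, if_pos (by omega)]
          · rw [if_neg hlt, if_neg (by omega)]
      · dsimp only
        rw [r2, List.drop_drop]
        congr 1
        ring

lemma generating_matrix_eq (rows columns : Int) :
    generating_matrix rows columns =
      (List.range rows.toNat).map (fun _ => (List.range columns.toNat).map (fun _ => " ")) := by
  unfold generating_matrix
  rw [pyRange_zero_int rows, pyRange_zero_int columns]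
  rw [PySem.List.foldl_append_singleton_eq_map]
  simp only [List.nil_append, List.map_map]
  apply List.map_congr_left
  intro x _
  rw [PySem.List.foldl_append_singleton_eq_map]
  simp [Function.comp_def, List.map_const']

theorem inserting_values_eq (text : String) (rows : Int) (columns : Int) :
    inserting_values text rows columns = inserting_values_alt text rows columns := by
  unfold inserting_values inserting_values_alt
  rw [pyRange_zero_int rows, pyRange_zero_int columns, generating_matrix_eq]
  set cs := text.toList with hcs
  set R := rows.toNat with hR
  set C := columns.toNat with hC
  have hkeep : (fun c => !(c = '\n' || c = ',' || c = '!' || c = '?' || c = '\'')) = pvKeep := by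
    funext c; simp [pvKeep, pvBadA]
  rw [hkeep]
  set σ := cs.filter pvKeep with hσ
  dsimp only
  rw [List.foldl_map]
  obtain ⟨h1, _⟩ := pvOuter_fold cs C R R (le_refl R)
  rw [h1]
  dsimp only
  rw [List.map_map]
  apply List.map_congr_left
  intro x hx
  rw [if_pos (List.mem_range.mp hx)]
  simp only [Function.comp_apply]
  rw [List.map_map]
  apply List.map_congr_left
  intro y hy
  have hyC : y < C := List.mem_range.mp hy
  have hcol : columns = (C : Int) := by
    rw [hC]
    omega
  have hidx : (x : Int) * columns + (y : Int) = ((x * C + y : Nat) : Int) := by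
    rw [hcol]; push_cast; ring
  simp only [Function.comp_apply, hidx, ← hσ]
  rw [PySem.List.pyGetD_natCast]
  by_cases hlen : x * C + y < σ.length
  · rw [if_pos (by exact_mod_cast hlen)]
    unfold pvStrAt
    rw [List.getElem?_eq_getElem hlen, List.getD_eq_getElem _ _ hlen]
  · rw [if_neg (by exact_mod_cast hlen)]
    unfold pvStrAt
    rw [List.getElem?_eq_none_iff.mpr (by omega)]

-- ===== VERDICT (by name: the statement is the Claim_ definition above) =====
theorem inserting_values_spec : Claim_equal_inserting_values := by
  intro text rows columns _
  exact inserting_values_eq text rows columns
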